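-- pv_equiv track=rewrite | github.com/jinxx1/NewPythonCode | python_github/Python_script/rexTime.py | regFloat_negative
-- ===== SOURCE A (Python) =====
-- def regFloat_negative(word):
-- 	try:
-- 		a = filter(lambda ch: ch in '-0123456789.', str(word))
-- 		straa = ''.join([x for x in a])
-- 		nnmu = straa.count('.')
-- 		stra = straa.replace('.', '', nnmu - 1)
-- 	except:
-- 		stra = ''
-- 	return stra
-- ===== SOURCE B (Python) =====
-- def regFloat_negative(word):
-- 	try:
-- 		out = []
-- 		seen_dot = False
-- 		for ch in reversed(str(word)):
-- 			if ch in '-0123456789':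
-- 				out.append(ch)
-- 			elif ch == '.' and not seen_dot:
-- 				out.append(ch)
-- 				seen_dot = True
-- 		out.reverse()
-- 		return ''.join(out)
-- 	except:
-- 		return ''
-- ===== Notes on version B (the rewrite author's own statement) =====
-- stated objective: alternative
-- what changed: A filters the string, counts the dots, then does a count-limited replace to delete all but the last dot (several passes plus a rescanning replace); B makes a single pass over the reversed string with a seen-dot flag, keeping digits and minus signs and only the first dot met from the right, then reverses the output.
import Mathlib
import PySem

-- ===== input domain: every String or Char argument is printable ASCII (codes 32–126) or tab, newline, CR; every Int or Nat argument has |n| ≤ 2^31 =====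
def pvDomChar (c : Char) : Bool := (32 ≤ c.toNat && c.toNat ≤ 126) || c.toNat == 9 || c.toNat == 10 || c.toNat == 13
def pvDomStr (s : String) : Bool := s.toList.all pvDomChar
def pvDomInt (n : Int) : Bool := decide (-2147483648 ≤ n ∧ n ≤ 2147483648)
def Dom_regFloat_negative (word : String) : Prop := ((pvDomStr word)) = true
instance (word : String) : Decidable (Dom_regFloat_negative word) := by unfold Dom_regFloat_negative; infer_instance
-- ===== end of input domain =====

-- B makes one reversed pass with a seen-dot flag instead of A's filter + count + count-limited replace (alternative decomposition, same cost).
-- Neither body can raise on a string input (the try/except in both Pythons is dead), so there is no Pre_.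

-- ===== PORT A =====
-- Hand port of straa.replace('.', '', k) for the single-char pattern '.' and empty replacement —
-- exact there: Python replaces the first k dots scanning left to right (k = 0 → none; k < 0 → all).
def pyReplaceDotEmpty : List Char → Int → List Char
  | [], _ => []
  | c :: cs, k =>
    if k = 0 then c :: cs
    else if c = '.' then pyReplaceDotEmpty cs (k - 1)
    else c :: pyReplaceDotEmpty cs k

def regFloat_negative (word : String) : String :=
  -- a = filter(lambda ch: ch in '-0123456789.', str(word)); straa = ''.join([x for x in a])
  let straa : String := String.ofList (word.toList.filter
    (fun ch => PySem.Chars.isIn [ch] "-0123456789.".toList))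
  -- nnmu = straa.count('.')
  let nnmu : Int := (PySem.Str.count straa "." : Int)
  -- stra = straa.replace('.', '', nnmu - 1)
  String.ofList (pyReplaceDotEmpty straa.toList (nnmu - 1))

-- ===== PORT B =====
-- the body of B's for-loop: keep digits and '-', keep a '.' only if none was seen yet
def stepB (st : List Char × Bool) (ch : Char) : List Char × Bool :=
  if PySem.Chars.isIn [ch] "-0123456789".toList then (st.1 ++ [ch], st.2)
  else if ch == '.' && !st.2 then (st.1 ++ [ch], true)
  else st

def regFloat_negative_alt (word : String) : String :=
  -- out = []; seen_dot = False; for ch in reversed(str(word)): stepB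
  let r := word.toList.reverse.foldl stepB ([], false)
  -- out.reverse(); return ''.join(out)
  String.ofList r.1.reverse

-- ===== PRECONDITION & SPEC =====
def Spec_regFloat_negative (word : String) (out : String) : Prop := out = regFloat_negative_alt word
instance (word : String) (out : String) : Decidable (Spec_regFloat_negative word out) := by unfold Spec_regFloat_negative; infer_instance

-- ===== CLAIM (what is proved, stated in full; the proofs are below) =====
def Claim_equal_regFloat_negative : Prop := ∀ (word : String), Dom_regFloat_negative word → Spec_regFloat_negative word (regFloat_negative word)

-- ===== LEMMAS AND PROOFS =====

-- 'ch in "-0123456789"' and 'ch in "-0123456789."' as plain membership tests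
def aOK (c : Char) : Bool := "-0123456789".toList.contains c
def pOK (c : Char) : Bool := aOK c || c == '.'

-- Spec-level middle ground: drop every '.' that has another '.' after it; keep everything else.
def elbd : List Char → List Char
  | [] => []
  | c :: cs => if c = '.' ∧ cs.count '.' ≠ 0 then elbd cs else c :: elbd cs

-- B's loop as a structural recursion over the (already reversed) character list.
def gB : List Char → Bool → List Char
  | [], _ => []
  | c :: cs, s =>
    if aOK c then c :: gB cs s
    else if c == '.' && !s then c :: gB cs true
    else gB cs s

theorem isIn_singleton (c : Char) (s : List Char) :
    PySem.Chars.isIn [c] s = s.contains c := by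
  by_cases h : c ∈ s
  · rcases List.mem_iff_append.1 h with ⟨l, r, hlr⟩
    have h1 : PySem.Chars.isIn [c] s = true :=
      (PySem.Chars.isIn_iff_infix [c] s).2 ⟨l, r, by simp [hlr]⟩
    have h2 : s.contains c = true := by simpa using h
    rw [h1, h2]
  · have h1 : PySem.Chars.isIn [c] s = false := by
      rw [Bool.eq_false_iff]
      intro hh
      rcases (PySem.Chars.isIn_iff_infix [c] s).1 hh with ⟨l, r, hlr⟩
      exact h (by rw [← hlr]; simp)
    have h2 : s.contains c = false := by simpa using h
    rw [h1, h2]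

theorem aOK_dot : aOK '.' = false := by decide

theorem beq_dot_false {c : Char} (hc : ¬ c = '.') : (c == '.') = false := by simpa using hc

theorem aOK_ne_dot {c : Char} (h : aOK c = true) : ¬ c = '.' := by
  intro hc; subst hc; exact absurd h (by decide)

theorem stepB_eq (st : List Char × Bool) (ch : Char) :
    stepB st ch =
      if aOK ch then (st.1 ++ [ch], st.2)
      else if ch == '.' && !st.2 then (st.1 ++ [ch], true)
      else st := by
  rw [stepB, isIn_singleton]; rfl

theorem isIn_filterPred (c : Char) :
    PySem.Chars.isIn [c] "-0123456789.".toList = pOK c := by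
  rw [isIn_singleton]
  have e : "-0123456789.".toList = "-0123456789".toList ++ ['.'] := by decide
  rw [e, List.contains_append]
  by_cases hc : c = '.'
  · subst hc; decide
  · simp [pOK, aOK, hc]

theorem count_go_singleton (c : Char) :
    ∀ (fuel : ℕ) (l : List Char) (acc : ℕ), l.length ≤ fuel →
      PySem.Chars.count.go [c] fuel l acc = acc + l.count c := by
  intro fuel
  induction fuel with
  | zero =>
    intro l acc h
    have : l = [] := List.length_eq_zero_iff.1 (Nat.le_zero.1 h)
    subst this; simp [PySem.Chars.count.go]
  | succ n ih =>
    intro l acc h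
    cases l with
    | nil => simp [PySem.Chars.count.go]
    | cons a t =>
      have hpre : List.isPrefixOf [c] (a :: t) = (c == a) := by
        simp [List.isPrefixOf]
      by_cases hc : c = a
      · subst hc
        rw [PySem.Chars.count.go]
        simp only [hpre, beq_self_eq_true, if_true]
        have hd : List.drop [c].length (c :: t) = t := rfl
        rw [hd]
        have hcnt : List.count c (c :: t) = List.count c t + 1 := by simp
        rw [hcnt]
        have := ih t (acc + 1) (by simpa using Nat.lt_succ_iff.1 (by simpa using h))
        omega
      · rw [PySem.Chars.count.go]
        have hb : (c == a) = false := by simpa using hc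
        simp only [hpre, hb]
        have hcnt : List.count c (a :: t) = List.count c t := by
          simp [Ne.symm hc]
        rw [hcnt]
        exact ih t acc (by simpa using Nat.lt_succ_iff.1 (by simpa using h))

theorem chars_count_singleton (c : Char) (l : List Char) :
    PySem.Chars.count l [c] = l.count c := by
  simp [PySem.Chars.count, count_go_singleton c l.length l 0 (le_refl _)]

theorem elbd_of_count_le_one (l : List Char) (h : l.count '.' ≤ 1) : elbd l = l := by
  induction l with
  | nil => rfl
  | cons c cs ih =>
    by_cases hc : c = '.'
    · subst hc
      have h0 : cs.count '.' = 0 := by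
        have := h; simp at this; omega
      simp [elbd, h0, ih (by omega)]
    · have h' : cs.count '.' ≤ 1 := by
        have := h; simpa [List.count_cons, beq_dot_false hc] using this
      simp [elbd, hc, ih h']

-- A's count-limited replace, at exactly count-1 dots, keeps only the last dot.
theorem replace_eq_elbd (l : List Char) :
    pyReplaceDotEmpty l ((l.count '.' : Int) - 1) = elbd l := by
  induction l with
  | nil => rfl
  | cons c cs ih =>
    by_cases hc : c = '.'
    · subst hc
      have hcc : (('.' :: cs).count '.' : Int) = (cs.count '.' : Int) + 1 := by
        simp
      rw [hcc]
      by_cases h0 : cs.count '.' = 0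
      · rw [pyReplaceDotEmpty, if_pos (by omega : ((cs.count '.' : Int) + 1) - 1 = 0)]
        rw [elbd, if_neg (by simp [h0]), elbd_of_count_le_one cs (by omega)]
      · rw [pyReplaceDotEmpty,
          if_neg (by have : 1 ≤ cs.count '.' := Nat.one_le_iff_ne_zero.2 h0; omega),
          if_pos rfl]
        have harg : (cs.count '.' : Int) + 1 - 1 - 1 = (cs.count '.' : Int) - 1 := by ring
        rw [harg, ih, elbd, if_pos ⟨rfl, h0⟩]
    · have hcc : ((c :: cs).count '.' : Int) = (cs.count '.' : Int) := by
        simp [List.count_cons, beq_dot_false hc]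
      rw [hcc]
      by_cases h1 : cs.count '.' = 1
      · rw [pyReplaceDotEmpty, if_pos (by rw [h1]; ring)]
        rw [elbd, if_neg (by tauto), elbd_of_count_le_one cs (by omega)]
      · rw [pyReplaceDotEmpty, if_neg (by omega), if_neg hc, ih,
          elbd, if_neg (by tauto)]

-- B's foldl is gB.
theorem foldl_eq_gB : ∀ (l : List Char) (acc : List Char) (s : Bool),
    (l.foldl stepB (acc, s)).1 = acc ++ gB l s := by
  intro l
  induction l with
  | nil => intro acc s; simp [gB]
  | cons c cs ih =>
    intro acc s
    rw [List.foldl_cons, stepB_eq]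
    by_cases h1 : aOK c = true
    · rw [if_pos h1]
      show (cs.foldl stepB (acc ++ [c], s)).1 = acc ++ gB (c :: cs) s
      rw [ih, gB, if_pos h1]
      simp
    · have h1' : aOK c = false := Bool.eq_false_iff.2 h1
      rw [if_neg (by simp [h1'])]
      by_cases h2 : (c == '.' && !s) = true
      · rw [if_pos h2]
        show (cs.foldl stepB (acc ++ [c], true)).1 = acc ++ gB (c :: cs) s
        rw [ih, gB, if_neg (by simp [h1']), if_pos h2]
        simp
      · have h2' : (c == '.' && !s) = false := Bool.eq_false_iff.2 h2
        rw [if_neg (by simp [h2'])]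
        show (cs.foldl stepB (acc, s)).1 = acc ++ gB (c :: cs) s
        rw [ih, gB, if_neg (by simp [h1']), if_neg (by simp [h2'])]

-- gB's flag after a block is true iff the block held a dot (or it already was true).
theorem gB_append : ∀ (m m' : List Char) (s : Bool),
    gB (m ++ m') s = gB m s ++ gB m' (s || m.contains '.') := by
  intro m
  induction m with
  | nil => intro m' s; simp [gB]
  | cons c cs ih =>
    intro m' s
    rw [List.cons_append]
    by_cases hc : c = '.'
    · subst hc
      cases s with
      | false => simp [gB, aOK_dot, ih]
      | true => simp [gB, aOK_dot, ih]
    · have hcd : (c == '.') = false := beq_dot_false hc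
      have hdc : ¬ ('.' = c) := fun e => hc e.symm
      by_cases h1 : aOK c = true
      · simp [gB, h1, ih, hdc]
      · have h1' : aOK c = false := Bool.eq_false_iff.2 h1
        simp [gB, h1', hcd, ih, hdc]

theorem count_filter_dot : ∀ (cs : List Char),
    (cs.filter pOK).count '.' = cs.count '.' := by
  intro cs
  induction cs with
  | nil => rfl
  | cons c t ih =>
    by_cases hc : c = '.'
    · subst hc
      rw [List.filter_cons, if_pos (by decide)]
      simp [ih]
    · by_cases hp : pOK c = true
      · rw [List.filter_cons, if_pos hp]
        simp [List.count_cons, beq_dot_false hc, ih]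
      · rw [List.filter_cons, if_neg (by simpa using hp)]
        simp [List.count_cons, beq_dot_false hc, ih]

-- the main bridge: B's reversed pass equals keep-only-the-last-dot on the filtered string.
theorem gB_reverse_eq_elbd_filter (l : List Char) :
    (gB l.reverse false).reverse = elbd (l.filter pOK) := by
  induction l with
  | nil => rfl
  | cons c cs ih =>
    have hrev : (c :: cs).reverse = cs.reverse ++ [c] := by simp
    rw [hrev, gB_append]
    have hb : (false || cs.reverse.contains '.') = cs.contains '.' := by simp
    rw [hb]
    by_cases h1 : aOK c = true
    · -- digit or '-': kept by both, never a dot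
      have hc : ¬ c = '.' := aOK_ne_dot h1
      have hone : gB [c] (cs.contains '.') = [c] := by
        simp [gB, h1]
      rw [hone, List.filter_cons, if_pos (by simp [pOK, h1])]
      rw [elbd, if_neg (by tauto)]
      simp [ih]
    · have h1' : aOK c = false := Bool.eq_false_iff.2 h1
      by_cases hc : c = '.'
      · -- a dot: B keeps it iff no dot before it in reversed order ⟺ no dot after it in l
        subst hc
        rw [List.filter_cons, if_pos (by decide)]
        by_cases hdot : cs.contains '.' = true
        · have hne : (cs.filter pOK).count '.' ≠ 0 := by
            rw [count_filter_dot]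
            have : '.' ∈ cs := by simpa using hdot
            simpa [List.count_eq_zero] using this
          have hone : gB ['.'] (cs.contains '.') = [] := by
            rw [hdot]; simp [gB, h1']
          rw [hone, elbd, if_pos ⟨rfl, hne⟩]
          simpa using ih
        · have hdot' : cs.contains '.' = false := Bool.eq_false_iff.2 hdot
          have h0 : (cs.filter pOK).count '.' = 0 := by
            rw [count_filter_dot]
            have : ¬ '.' ∈ cs := by simpa using hdot
            simpa [List.count_eq_zero] using this
          have hone : gB ['.'] (cs.contains '.') = ['.'] := by
            rw [hdot']; simp [gB, h1']
          rw [hone, elbd, if_neg (by simp [h0])]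
          simp [ih]
      · -- junk char: dropped by both
        have hcd : (c == '.') = false := beq_dot_false hc
        have hone : gB [c] (cs.contains '.') = [] := by
          simp [gB, h1', hcd]
        rw [hone, List.filter_cons, if_neg (by simp [pOK, h1', hcd])]
        simp [ih]

-- ===== VERDICT (by name: the statement is the Claim_ definition above) =====
theorem regFloat_negative_spec : Claim_equal_regFloat_negative := by
  intro word _
  unfold Spec_regFloat_negative
  have hA : regFloat_negative word = String.ofList (pyReplaceDotEmpty
      ((String.ofList (word.toList.filter
        (fun ch => PySem.Chars.isIn [ch] "-0123456789.".toList))).toList)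
      ((PySem.Str.count (String.ofList (word.toList.filter
        (fun ch => PySem.Chars.isIn [ch] "-0123456789.".toList))) "." : Int) - 1)) := rfl
  have hB : regFloat_negative_alt word
      = String.ofList ((word.toList.reverse.foldl stepB ([], false)).1.reverse) := rfl
  rw [hA, hB, foldl_eq_gB]
  simp only [List.nil_append]
  congr 1
  rw [gB_reverse_eq_elbd_filter]
  have hfil : (fun ch => PySem.Chars.isIn [ch] "-0123456789.".toList) = pOK := by
    funext ch; exact isIn_filterPred ch
  rw [hfil]
  have hl : (String.ofList (word.toList.filter pOK)).toList
      = word.toList.filter pOK := String.toList_ofList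
  rw [PySem.Str.count, hl]
  have hdotstr : ("." : String).toList = ['.'] := rfl
  rw [hdotstr, chars_count_singleton, replace_eq_elbd]
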